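-- pv_equiv track=rewrite | github.com/Katock-Cricket/pdf_build_qa | src/pdf_processor.py | _integrate_content
-- ===== SOURCE A (Python) =====
-- def _integrate_content(basic_text, structured_text, formulas):
--     """
--     整合不同来源的内容，确保文本连贯，公式位于正确位置
--
--     Args:
--         basic_text: 基本文本
--         structured_text: 结构化文本
--         formulas: 公式列表
--
--     Returns:
--         str: 整合后的最终文本
--     """
--     # 如果没有检测到公式，直接返回更好的文本版本
--     if not formulas:
--         return structured_text if structured_text else basic_text
--
--     # 将公式按照页码和位置排序
--     formulas.sort(key=lambda x: (x[0], x[1][1]))  # 按页码和y坐标排序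
--
--     # 将公式插入到文本中适当位置
--     lines = structured_text.split('\n')
--     result = []
--     formula_idx = 0
--
--     # 假设每个公式应该插入在最近的文本段落后面
--     current_page = 0
--
--     for i, line in enumerate(lines):
--         # 检查是否需要插入公式
--         result.append(line)
--
--         if formula_idx < len(formulas):
--             formula_page, formula_bbox, formula_latex = formulas[formula_idx]
--
--             if i < len(lines) - 1:
--                 next_line = lines[i + 1]
--                 if not next_line.strip():  # 如果下一行是空行，可能是段落结束
--                     if formula_page == current_page:
--                         # 在段落结束处插入公式
--                         result.append(f"[FORMULA: {formula_latex}]")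
--                         formula_idx += 1
--
--         # 估计当前页码
--         if not line.strip() and i > 0 and i < len(lines) - 1:
--             # 检测可能的页面变化
--             if lines[i - 1].strip() and lines[i + 1].strip():
--                 current_page += 1
--
--     # 将剩余的公式添加到文档末尾
--     while formula_idx < len(formulas):
--         _, _, formula_latex = formulas[formula_idx]
--         result.append(f"[FORMULA: {formula_latex}]")
--         formula_idx += 1
--
--     return '\n'.join(result)
-- ===== SOURCE B (Python) =====
-- def _integrate_content(basic_text, structured_text, formulas):
--     # Two-pass re-implementation: first pre-compute the page number in effect
--     # at each line, then insert formulas in a single stateless-page scan.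
--     # Like A, it sorts `formulas` in place (observable mutation).
--     if not formulas:
--         return structured_text if structured_text else basic_text
--
--     formulas.sort(key=lambda x: (x[0], x[1][1]))
--
--     lines = structured_text.split('\n')
--     n = len(lines)
--
--     # Pass 1: pages[i] = page number in effect when line i is processed.
--     pages = []
--     page = 0
--     for i, line in enumerate(lines):
--         pages.append(page)
--         if (not line.strip() and 0 < i < n - 1
--                 and lines[i - 1].strip() and lines[i + 1].strip()):
--             page += 1
--
--     # Pass 2: emit lines, inserting each formula after a paragraph on its page.
--     out = []
--     fi = 0
--     for i, line in enumerate(lines):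
--         out.append(line)
--         if (fi < len(formulas) and i < n - 1
--                 and not lines[i + 1].strip()
--                 and formulas[fi][0] == pages[i]):
--             out.append(f"[FORMULA: {formulas[fi][2]}]")
--             fi += 1
--
--     out.extend(f"[FORMULA: {f[2]}]" for f in formulas[fi:])
--     return '\n'.join(out)
-- ===== Notes on version B (the rewrite author's own statement) =====
-- stated objective: alternative
-- what changed: A's single loop threads a mutable current_page through the same pass that inserts formulas; B decomposes it into two passes: a first pass precomputes pages[i], the page number in effect at each line, and a second pass inserts formulas using that table, so the insertion scan carries no page state.
import Mathlib
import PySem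

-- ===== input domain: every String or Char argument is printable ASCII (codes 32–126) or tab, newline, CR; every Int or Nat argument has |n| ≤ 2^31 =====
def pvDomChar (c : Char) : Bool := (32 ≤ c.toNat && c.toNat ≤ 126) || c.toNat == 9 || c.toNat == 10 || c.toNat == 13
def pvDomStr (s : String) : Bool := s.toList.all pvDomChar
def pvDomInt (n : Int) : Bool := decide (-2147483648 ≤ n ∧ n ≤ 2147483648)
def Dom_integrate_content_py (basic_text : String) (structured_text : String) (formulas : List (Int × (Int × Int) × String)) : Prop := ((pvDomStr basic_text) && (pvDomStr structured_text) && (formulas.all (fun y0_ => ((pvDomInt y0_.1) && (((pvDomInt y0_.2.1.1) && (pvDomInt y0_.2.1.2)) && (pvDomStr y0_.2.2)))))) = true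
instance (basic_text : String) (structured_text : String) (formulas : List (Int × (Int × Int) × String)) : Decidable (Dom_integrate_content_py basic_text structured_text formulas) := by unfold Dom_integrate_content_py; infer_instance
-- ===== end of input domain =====

-- B is a two-pass decomposition (page numbers precomputed per line, then one insertion scan);
-- equivalence is about the RETURN value — both Pythons also sort `formulas` in place.

-- shared helper: Python's `not s.strip()`
def pvBlank (s : String) : Bool := PySem.Str.strip s == ""

-- ===== PORT A =====
-- A's single loop carries (result, formula_idx, current_page) and updates the page after the insert check.
def pvAStep (lines : List String) (fs : List (Int × (Int × Int) × String)) (n : Nat)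
    (st : List String × Nat × Int) (p : Int × String) : List String × Nat × Int :=
  let i := p.1
  let line := p.2
  let res := st.1 ++ [line]
  let fi := st.2.1
  let page := st.2.2
  let rf : List String × Nat :=
    if fi < fs.length then
      let f := fs.getD fi (0, (0, 0), "")
      if i < (n : Int) - 1 then
        if pvBlank (PySem.List.pyGetD lines (i + 1) "") then
          if f.1 == page then (res ++ ["[FORMULA: " ++ f.2.2 ++ "]"], fi + 1)
          else (res, fi)
        else (res, fi)
      else (res, fi)
    else (res, fi)
  let page' :=
    if pvBlank line && decide (0 < i) && decide (i < (n : Int) - 1) &&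
        !pvBlank (PySem.List.pyGetD lines (i - 1) "") &&
        !pvBlank (PySem.List.pyGetD lines (i + 1) "") then page + 1 else page
  (rf.1, rf.2, page')

def integrate_content_py (basic_text : String) (structured_text : String) (formulas : List (Int × (Int × Int) × String)) : String :=
  if formulas = [] then (if structured_text ≠ "" then structured_text else basic_text)
  else
    let fs := PySem.List.sorted2 formulas (fun x => x.1) (fun x => x.2.1.2)
    let lines := (PySem.Str.split? structured_text "\n").getD []
    let n := lines.length
    let st := (PySem.List.enumerate lines).foldl (pvAStep lines fs n) ([], 0, 0)
    PySem.Str.join "\n" (st.1 ++ (fs.drop st.2.1).map (fun f => "[FORMULA: " ++ f.2.2 ++ "]"))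

-- ===== PORT B =====
-- pass 1: page number in effect at each line
def pvPageStep (lines : List String) (n : Nat)
    (st : List Int × Int) (p : Int × String) : List Int × Int :=
  let i := p.1
  let line := p.2
  let st1 := st.1 ++ [st.2]
  let pg :=
    if pvBlank line && decide (0 < i) && decide (i < (n : Int) - 1) &&
        !pvBlank (PySem.List.pyGetD lines (i - 1) "") &&
        !pvBlank (PySem.List.pyGetD lines (i + 1) "") then st.2 + 1 else st.2
  (st1, pg)

-- pass 2: emit lines, inserting each formula after a paragraph on its page
def pvBStep (lines : List String) (fs : List (Int × (Int × Int) × String)) (n : Nat) (pages : List Int)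
    (st : List String × Nat) (p : Int × String) : List String × Nat :=
  let i := p.1
  let line := p.2
  let out := st.1 ++ [line]
  let fi := st.2
  if fi < fs.length && decide (i < (n : Int) - 1) &&
      pvBlank (PySem.List.pyGetD lines (i + 1) "") &&
      (fs.getD fi (0, (0, 0), "")).1 == PySem.List.pyGetD pages i 0 then
    (out ++ ["[FORMULA: " ++ (fs.getD fi (0, (0, 0), "")).2.2 ++ "]"], fi + 1)
  else (out, fi)

def integrate_content_py_alt (basic_text : String) (structured_text : String) (formulas : List (Int × (Int × Int) × String)) : String :=
  if formulas = [] then (if structured_text ≠ "" then structured_text else basic_text)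
  else
    let fs := PySem.List.sorted2 formulas (fun x => x.1) (fun x => x.2.1.2)
    let lines := (PySem.Str.split? structured_text "\n").getD []
    let n := lines.length
    let pages := ((PySem.List.enumerate lines).foldl (pvPageStep lines n) ([], 0)).1
    let st := (PySem.List.enumerate lines).foldl (pvBStep lines fs n pages) ([], 0)
    PySem.Str.join "\n" (st.1 ++ (fs.drop st.2).map (fun f => "[FORMULA: " ++ f.2.2 ++ "]"))

-- ===== PRECONDITION & SPEC =====
def Spec_integrate_content_py (basic_text : String) (structured_text : String) (formulas : List (Int × (Int × Int) × String)) (out : String) : Prop := out = integrate_content_py_alt basic_text structured_text formulas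
instance (basic_text : String) (structured_text : String) (formulas : List (Int × (Int × Int) × String)) (out : String) : Decidable (Spec_integrate_content_py basic_text structured_text formulas out) := by unfold Spec_integrate_content_py; infer_instance

-- ===== CLAIM (what is proved, stated in full; the proofs are below) =====
def Claim_equal_integrate_content_py : Prop := ∀ (basic_text : String) (structured_text : String) (formulas : List (Int × (Int × Int) × String)), Dom_integrate_content_py basic_text structured_text formulas → Spec_integrate_content_py basic_text structured_text formulas (integrate_content_py basic_text structured_text formulas)

-- ===== LEMMAS AND PROOFS =====

-- the page-update rule shared by A's loop and B's first pass
def pvNext (lines : List String) (n : Nat) (page : Int) (p : Int × String) : Int :=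
  if pvBlank p.2 && decide (0 < p.1) && decide (p.1 < (n : Int) - 1) &&
      !pvBlank (PySem.List.pyGetD lines (p.1 - 1) "") &&
      !pvBlank (PySem.List.pyGetD lines (p.1 + 1) "") then page + 1 else page

-- the per-line page numbers produced from state `page` over the remaining enumerated lines
def pvPagesFrom (lines : List String) (n : Nat) (page : Int) : List (Int × String) → List Int
  | [] => []
  | p :: ps => page :: pvPagesFrom lines n (pvNext lines n page p) ps

theorem pvPages_fold (lines : List String) (n : Nat) (ps : List (Int × String)) :
    ∀ (acc : List Int) (page : Int),
    (ps.foldl (pvPageStep lines n) (acc, page)).1 = acc ++ pvPagesFrom lines n page ps := by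
  induction ps with
  | nil => intro acc page; simp [pvPagesFrom]
  | cons p ps ih =>
    intro acc page
    rw [List.foldl_cons]
    show (ps.foldl (pvPageStep lines n) (acc ++ [page], pvNext lines n page p)).1 = _
    rw [ih, pvPagesFrom]
    simp

theorem pvStep_agree (lines : List String) (fs : List (Int × (Int × Int) × String))
    (n : Nat) (pages : List Int) (i : Int) (line : String) (res : List String)
    (fi : Nat) (page : Int) (h : PySem.List.pyGetD pages i 0 = page) :
    ((pvAStep lines fs n (res, fi, page) (i, line)).1,
     (pvAStep lines fs n (res, fi, page) (i, line)).2.1)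
      = pvBStep lines fs n pages (res, fi) (i, line) := by
  simp only [pvAStep, pvBStep, h]
  by_cases h1 : fi < fs.length <;>
    by_cases h2 : i < (n : Int) - 1 <;>
      by_cases h3 : pvBlank (PySem.List.pyGetD lines (i + 1) "") = true <;>
        by_cases h4 : ((fs.getD fi (0, (0, 0), "")).1 == page) = true <;>
          simp [h1, h2, h3, h4]


theorem pvMain (lines : List String) (fs : List (Int × (Int × Int) × String))
    (pages : List Int) (l : List String) :
    ∀ (k : Nat) (res : List String) (fi : Nat) (page : Int),
    pages.drop k = pvPagesFrom lines lines.length page (PySem.List.enumerate l (k : Int)) →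
    (((PySem.List.enumerate l (k : Int)).foldl (pvAStep lines fs lines.length) (res, fi, page)).1,
     ((PySem.List.enumerate l (k : Int)).foldl (pvAStep lines fs lines.length) (res, fi, page)).2.1)
      = (PySem.List.enumerate l (k : Int)).foldl (pvBStep lines fs lines.length pages) (res, fi) := by
  induction l with
  | nil => intro k res fi page _; simp
  | cons line l' ih =>
    intro k res fi page hp
    rw [PySem.List.enumerate_cons] at hp ⊢
    have hcast : (k : Int) + 1 = ((k + 1 : Nat) : Int) := by push_cast; ring
    rw [pvPagesFrom] at hp
    -- pages[k] = page
    have hk : PySem.List.pyGetD pages (k : Int) 0 = page := by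
      rw [PySem.List.pyGetD_natCast]
      have h? : pages[k]? = some page := by
        rw [← List.head?_drop, hp]; rfl
      simp [List.getD_eq_getElem?_getD, h?]
    rw [List.foldl_cons, List.foldl_cons]
    have hstep : pvAStep lines fs lines.length (res, fi, page) ((k : Int), line)
        = ((pvBStep lines fs lines.length pages (res, fi) ((k : Int), line)).1,
           (pvBStep lines fs lines.length pages (res, fi) ((k : Int), line)).2,
           pvNext lines lines.length page ((k : Int), line)) := by
      have := pvStep_agree lines fs lines.length pages (k : Int) line res fi page hk
      have hpg : (pvAStep lines fs lines.length (res, fi, page) ((k : Int), line)).2.2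
          = pvNext lines lines.length page ((k : Int), line) := by
        simp only [pvAStep, pvNext]
      have hA1 : (pvAStep lines fs lines.length (res, fi, page) ((k : Int), line)).1
          = (pvBStep lines fs lines.length pages (res, fi) ((k : Int), line)).1 :=
        congrArg Prod.fst this
      have hA2 : (pvAStep lines fs lines.length (res, fi, page) ((k : Int), line)).2.1
          = (pvBStep lines fs lines.length pages (res, fi) ((k : Int), line)).2 :=
        congrArg Prod.snd this
      exact Prod.ext hA1 (Prod.ext hA2 hpg)
    rw [hstep, hcast] at *
    exact ih (k + 1)
      (pvBStep lines fs lines.length pages (res, fi) (((k : Nat) : Int), line)).1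
      (pvBStep lines fs lines.length pages (res, fi) (((k : Nat) : Int), line)).2
      (pvNext lines lines.length page (((k : Nat) : Int), line))
      (by
        have : pages.drop (k + 1) = (pages.drop k).drop 1 := by
          rw [List.drop_drop]
        rw [this, hp]
        simp)

-- ===== VERDICT (by name: the statement is the Claim_ definition above) =====
theorem integrate_content_py_spec : Claim_equal_integrate_content_py := by
  intro basic_text structured_text formulas _
  unfold Spec_integrate_content_py integrate_content_py integrate_content_py_alt
  by_cases hf : formulas = []
  · simp [hf]
  · simp only [hf, if_false]
    set fs := PySem.List.sorted2 formulas (fun x => x.1) (fun x => x.2.1.2) with hfs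
    set lines := (PySem.Str.split? structured_text "\n").getD [] with hlines
    set pages := ((PySem.List.enumerate lines).foldl (pvPageStep lines lines.length) ([], 0)).1 with hpages
    have h0 : PySem.List.enumerate lines (0 : Int) = PySem.List.enumerate lines ((0 : Nat) : Int) := by
      norm_num
    have hp0 : pages.drop 0 = pvPagesFrom lines lines.length 0 (PySem.List.enumerate lines ((0 : Nat) : Int)) := by
      rw [List.drop_zero, hpages, ← h0, pvPages_fold lines lines.length (PySem.List.enumerate lines (0 : Int)) [] 0]
      simp
    have hmain := pvMain lines fs pages lines 0 [] 0 0 hp0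
    rw [← h0] at hmain
    have h1 := congrArg Prod.fst hmain
    have h2 := congrArg Prod.snd hmain
    simp only at h1 h2
    rw [h1, h2]
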